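-- pv_equiv track=rewrite | github.com/wenxind/privact-utility-tradeoff-in-peer-review-data | projection.py | edge_map
-- ===== SOURCE A (Python) =====
-- def no_cross(a, b):
--     if a[0]==b[0] or a[0]==b[1] or a[1]==b[0] or a[1]==b[1]:
--         return False
--     else:
--         return True
--
-- def edge_map(assignments):
--     graph = dict()
--     for (s1, s2) in assignments:
--         graph[(s1, s2)] = set()
--
--     for i in range(len(assignments)):
--         for (s1, s2) in assignments[i+1:]:
--             if no_cross(assignments[i], (s1, s2)):
--                 graph[assignments[i]].add((s1, s2))
--                 graph[(s1, s2)].add(assignments[i])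
--
--     return graph
-- ===== SOURCE B (Python) =====
-- def edge_map(assignments):
--     # Index each endpoint value to the set of nodes containing it; adjacency = nodes minus crossing.
--     nodes = list(dict.fromkeys(assignments))
--     index = {}
--     for (s1, s2) in nodes:
--         index.setdefault(s1, set()).add((s1, s2))
--         index.setdefault(s2, set()).add((s1, s2))
--     return {v: {u for u in nodes if u not in index[v[0]] and u not in index[v[1]]}
--             for v in nodes}
-- ===== Notes on version B (the rewrite author's own statement) =====
-- stated objective: alternative
-- what changed: Replaces the O(n^2) pairwise no_cross double loop with a one-pass endpoint index (endpoint -> set of nodes) built over the distinct nodes, then computes each node's adjacency as the distinct nodes minus those found under its two endpoints in the index.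
import Mathlib
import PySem

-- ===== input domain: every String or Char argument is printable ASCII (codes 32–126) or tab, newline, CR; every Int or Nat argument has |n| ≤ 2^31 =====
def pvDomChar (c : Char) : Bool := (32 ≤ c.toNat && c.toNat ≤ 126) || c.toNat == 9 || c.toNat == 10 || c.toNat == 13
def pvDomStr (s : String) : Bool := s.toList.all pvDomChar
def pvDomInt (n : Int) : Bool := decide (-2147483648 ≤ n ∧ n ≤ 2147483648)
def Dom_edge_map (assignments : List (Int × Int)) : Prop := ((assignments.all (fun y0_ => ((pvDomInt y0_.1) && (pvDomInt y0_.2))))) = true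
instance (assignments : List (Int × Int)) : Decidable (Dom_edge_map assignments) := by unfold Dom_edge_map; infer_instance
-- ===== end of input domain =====

-- B replaces A's pairwise no_cross double loop by an endpoint index (endpoint -> set of
-- nodes containing it) built in one pass over the distinct nodes; adjacency of a node is
-- then the distinct nodes not found under its two endpoints (alternative algorithm, same cost).

-- ===== PORT A =====
def no_cross (a b : Int × Int) : Bool :=
  if a.1 == b.1 || a.1 == b.2 || a.2 == b.1 || a.2 == b.2 then false else true

def edge_map (assignments : List (Int × Int)) : List (Int × Int × List (Int × Int)) :=
  let graph0 : PySem.Dict (Int × Int) (PySem.Set (Int × Int)) :=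
    assignments.foldl (fun g s => g.insert s PySem.Set.empty) PySem.Dict.empty
  let graph :=
    (PySem.List.pyRange 0 (assignments.length : Int) 1).foldl (fun g i =>
      (PySem.List.slice assignments (some (i + 1)) none).foldl (fun g p =>
        if no_cross (PySem.List.pyGetD assignments i (0, 0)) p then
          (g.modify (PySem.List.pyGetD assignments i (0, 0)) PySem.Set.empty
              (fun s => PySem.Set.add s p)).modify p PySem.Set.empty
            (fun s => PySem.Set.add s (PySem.List.pyGetD assignments i (0, 0)))
        else g) g) graph0
  graph.items.map (fun kv => (kv.1.1, kv.1.2, kv.2))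

-- ===== PORT B =====
def edge_map_alt (assignments : List (Int × Int)) : List (Int × Int × List (Int × Int)) :=
  let nodes := PySem.List.dedup assignments
  let index : PySem.Dict Int (PySem.Set (Int × Int)) :=
    nodes.foldl (fun d v =>
      (d.modify v.1 PySem.Set.empty (fun s => PySem.Set.add s v)).modify v.2
        PySem.Set.empty (fun s => PySem.Set.add s v)) PySem.Dict.empty
  nodes.map (fun v => (v.1, v.2,
    nodes.foldl (fun s u =>
      if !(PySem.Set.contains (index.getD v.1 PySem.Set.empty) u) &&
         !(PySem.Set.contains (index.getD v.2 PySem.Set.empty) u)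
      then PySem.Set.add s u else s) PySem.Set.empty))

-- ===== PRECONDITION & SPEC =====
def Spec_edge_map (assignments : List (Int × Int)) (out : List (Int × Int × List (Int × Int))) : Prop := out = edge_map_alt assignments
instance (assignments : List (Int × Int)) (out : List (Int × Int × List (Int × Int))) : Decidable (Spec_edge_map assignments out) := by unfold Spec_edge_map; infer_instance

-- ===== CLAIM (what is proved, stated in full; the proofs are below) =====
def Claim_equal_edge_map : Prop := ∀ (assignments : List (Int × Int)), Dom_edge_map assignments → Spec_edge_map assignments (edge_map assignments)

-- ===== LEMMAS AND PROOFS =====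

-- Shared abstract form: adjacency of v = distinct nodes that do not share an endpoint with v.
def adjOf (l : List (Int × Int)) (v : Int × Int) : List (Int × Int) :=
  (PySem.List.dedup l).filter (fun u => no_cross u v)

-- State of A's slot for v after the first i outer iterations.
def slotOf (l : List (Int × Int)) (i : Nat) (v : Int × Int) : List (Int × Int) :=
  if v ∈ l.take i then adjOf l v
  else (PySem.List.dedup (l.take i)).filter (fun u => no_cross u v)

def graph0A (l : List (Int × Int)) : PySem.Dict (Int × Int) (PySem.Set (Int × Int)) :=
  l.foldl (fun g s => g.insert s PySem.Set.empty) PySem.Dict.empty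

def bodyA (l : List (Int × Int)) (g : PySem.Dict (Int × Int) (PySem.Set (Int × Int))) (i : Int) :
    PySem.Dict (Int × Int) (PySem.Set (Int × Int)) :=
  (PySem.List.slice l (some (i + 1)) none).foldl (fun g p =>
    if no_cross (PySem.List.pyGetD l i (0, 0)) p then
      (g.modify (PySem.List.pyGetD l i (0, 0)) PySem.Set.empty
          (fun s => PySem.Set.add s p)).modify p PySem.Set.empty
        (fun s => PySem.Set.add s (PySem.List.pyGetD l i (0, 0)))
    else g) g

def innerF (a : Int × Int) (g : PySem.Dict (Int × Int) (PySem.Set (Int × Int))) (p : Int × Int) :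
    PySem.Dict (Int × Int) (PySem.Set (Int × Int)) :=
  if no_cross a p then
    (g.modify a PySem.Set.empty (fun s => PySem.Set.add s p)).modify p PySem.Set.empty
      (fun s => PySem.Set.add s a)
  else g

lemma edge_map_eq_fold (l : List (Int × Int)) :
    edge_map l = ((PySem.List.pyRange 0 (l.length : Int) 1).foldl (bodyA l) (graph0A l)).items.map
      (fun kv => (kv.1.1, kv.1.2, kv.2)) := rfl

lemma no_cross_self (a : Int × Int) : no_cross a a = false := by simp [no_cross]

lemma no_cross_comm (a b : Int × Int) : no_cross a b = no_cross b a := by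
  have h : (a.1 == b.1 || a.1 == b.2 || a.2 == b.1 || a.2 == b.2) =
      (b.1 == a.1 || b.1 == a.2 || b.2 == a.1 || b.2 == a.2) := by
    rw [Bool.eq_iff_iff]
    simp only [Bool.or_eq_true, beq_iff_eq]
    tauto
  rw [no_cross, no_cross, h]

lemma ne_of_no_cross {a b : Int × Int} (h : no_cross a b = true) : a ≠ b := by
  rintro rfl; rw [no_cross_self] at h; exact Bool.false_ne_true h

lemma set_filter_add (s : PySem.Set (Int × Int)) (x : Int × Int) (c : Int × Int → Bool) :
    (PySem.Set.add s x).filter c =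
      if c x then PySem.Set.add (List.filter c s) x else List.filter c s := by
  by_cases hx : x ∈ s
  · rw [PySem.Set.add_of_mem hx]
    by_cases hc : c x
    · rw [if_pos hc, PySem.Set.add_of_mem (List.mem_filter.mpr ⟨hx, hc⟩)]
    · rw [if_neg hc]
  · rw [PySem.Set.add_of_not_mem hx, List.filter_append]
    by_cases hc : c x
    · rw [if_pos hc, PySem.Set.add_of_not_mem (fun h => hx (List.mem_filter.mp h).1)]
      simp [hc]
    · rw [if_neg hc]
      simp [hc]

lemma set_update_filter (t : List (Int × Int)) (s : PySem.Set (Int × Int)) (c : Int × Int → Bool) :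
    (PySem.Set.update s t).filter c = PySem.Set.update (List.filter c s) (t.filter c) := by
  induction t generalizing s with
  | nil => rfl
  | cons x t ih =>
    show (PySem.Set.update (s.add x) t).filter c = _
    rw [ih, set_filter_add]
    by_cases hc : c x <;> simp [hc]

lemma foldl_addIf_eq_update_filter (t : List (Int × Int)) (s : PySem.Set (Int × Int))
    (c : Int × Int → Bool) :
    t.foldl (fun s p => if c p then PySem.Set.add s p else s) s =
      PySem.Set.update s (t.filter c) := by
  induction t generalizing s with
  | nil => rfl
  | cons x t ih => by_cases hc : c x <;> simp [hc, ih]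

lemma set_update_of_subset (t : List (Int × Int)) (s : PySem.Set (Int × Int))
    (h : ∀ x ∈ t, x ∈ s) : PySem.Set.update s t = s := by
  induction t generalizing s with
  | nil => rfl
  | cons x t ih =>
    show PySem.Set.update (s.add x) t = s
    rw [PySem.Set.add_of_mem (h x (List.mem_cons_self))]
    exact ih s (fun y hy => h y (List.mem_cons_of_mem _ hy))

lemma set_update_of_disjoint : ∀ (t : List (Int × Int)) (s : PySem.Set (Int × Int)),
    t.Nodup → (∀ x ∈ t, x ∉ s) → PySem.Set.update s t = s ++ t := by
  intro t
  induction t with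
  | nil => intro s _ _; simp
  | cons x t ih =>
    intro s hn h
    show PySem.Set.update (s.add x) t = s ++ x :: t
    rw [PySem.Set.add_of_not_mem (h x (List.mem_cons_self))]
    have hd : ∀ y ∈ t, y ∉ s ++ [x] := by
      intro y hy hmem
      rcases List.mem_append.mp hmem with h1 | h1
      · exact h y (List.mem_cons_of_mem _ hy) h1
      · rcases List.mem_singleton.mp h1 with rfl
        exact (List.nodup_cons.mp hn).1 hy
    rw [ih (s ++ [x]) hn.of_cons hd]
    simp

lemma dedup_append (xs ys : List (Int × Int)) :
    PySem.List.dedup (xs ++ ys) = PySem.Set.update (PySem.List.dedup xs) ys := by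
  simp only [PySem.List.dedup_eq_ofList, PySem.Set.ofList_eq_foldl, List.foldl_append]
  rfl

-- B's endpoint index: membership characterisation.
lemma index_step (d : PySem.Dict Int (PySem.Set (Int × Int))) (v : Int × Int) (k : Int)
    (u : Int × Int) :
    u ∈ ((d.modify v.1 PySem.Set.empty (fun s => PySem.Set.add s v)).modify v.2
        PySem.Set.empty (fun s => PySem.Set.add s v)).getD k PySem.Set.empty ↔
      u ∈ d.getD k PySem.Set.empty ∨ (u = v ∧ (u.1 = k ∨ u.2 = k)) := by
  simp only [PySem.Dict.getD_modify]
  by_cases h2 : k = v.2 <;> by_cases h1 : k = v.1 <;>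
    simp_all [PySem.Set.mem_add] <;> aesop

lemma index_mem (t : List (Int × Int)) (d : PySem.Dict Int (PySem.Set (Int × Int)))
    (k : Int) (u : Int × Int) :
    u ∈ (t.foldl (fun d v =>
        (d.modify v.1 PySem.Set.empty (fun s => PySem.Set.add s v)).modify v.2
          PySem.Set.empty (fun s => PySem.Set.add s v)) d).getD k PySem.Set.empty ↔
      u ∈ d.getD k PySem.Set.empty ∨ (u ∈ t ∧ (u.1 = k ∨ u.2 = k)) := by
  induction t generalizing d with
  | nil => simp
  | cons v t ih =>
    rw [List.foldl_cons, ih, index_step, List.mem_cons]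
    tauto

-- ===== A-side: graph0 =====
lemma graph0_keys (l : List (Int × Int)) : (graph0A l).keys = PySem.List.dedup l := by
  have h := PySem.Dict.keys_foldl_insert (ν := PySem.Set (Int × Int)) l
    (fun _ _ => PySem.Set.empty) PySem.Dict.empty
  simp only [PySem.Dict.keys_empty] at h
  rw [graph0A, h, PySem.List.dedup_eq_ofList, PySem.Set.ofList_eq_foldl]
  rfl

lemma graph0_getD_aux (l : List (Int × Int)) (d : PySem.Dict (Int × Int) (PySem.Set (Int × Int)))
    (k : Int × Int) :
    (l.foldl (fun g s => g.insert s PySem.Set.empty) d).getD k PySem.Set.empty =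
      if k ∈ l then PySem.Set.empty else d.getD k PySem.Set.empty := by
  induction l generalizing d with
  | nil => simp
  | cons x t ih =>
    rw [List.foldl_cons, ih, PySem.Dict.getD_insert]
    by_cases h1 : k ∈ t <;> by_cases h2 : k = x <;> simp [List.mem_cons, h1, h2]

lemma graph0_getD (l : List (Int × Int)) (k : Int × Int) :
    (graph0A l).getD k PySem.Set.empty = PySem.Set.empty := by
  rw [graph0A, graph0_getD_aux]
  split_ifs <;> simp [PySem.Dict.getD_empty]

-- ===== A-side: inner loop =====
lemma keys_modify_mem (g : PySem.Dict (Int × Int) (PySem.Set (Int × Int))) (k : Int × Int)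
    (f : PySem.Set (Int × Int) → PySem.Set (Int × Int)) (h : k ∈ g.keys) :
    (g.modify k PySem.Set.empty f).keys = g.keys := by
  rw [PySem.Dict.keys_modify,
    PySem.Dict.keys_insert_of_contains _ _ ((PySem.Dict.contains_iff_mem_keys g k).mpr h)]

lemma inner_keys (t : List (Int × Int)) (g : PySem.Dict (Int × Int) (PySem.Set (Int × Int)))
    (a : Int × Int) (ha : a ∈ g.keys) (ht : ∀ p ∈ t, p ∈ g.keys) :
    (t.foldl (innerF a) g).keys = g.keys := by
  induction t generalizing g with
  | nil => rfl
  | cons p t ih =>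
    rw [List.foldl_cons]
    by_cases hc : no_cross a p
    · have hp := ht p List.mem_cons_self
      have hkeys : (innerF a g p).keys = g.keys := by
        rw [innerF, if_pos hc, keys_modify_mem, keys_modify_mem _ _ _ ha]
        rw [keys_modify_mem _ _ _ ha]; exact hp
      rw [ih (innerF a g p) (hkeys ▸ ha) (fun q hq => hkeys ▸ ht q (List.mem_cons_of_mem _ hq)),
        hkeys]
    · rw [innerF, if_neg hc]
      exact ih g ha (fun q hq => ht q (List.mem_cons_of_mem _ hq))

lemma inner_getD_self (t : List (Int × Int)) (g : PySem.Dict (Int × Int) (PySem.Set (Int × Int)))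
    (a : Int × Int) :
    (t.foldl (innerF a) g).getD a PySem.Set.empty =
      t.foldl (fun s p => if no_cross a p then PySem.Set.add s p else s)
        (g.getD a PySem.Set.empty) := by
  induction t generalizing g with
  | nil => rfl
  | cons p t ih =>
    rw [List.foldl_cons, List.foldl_cons, ih]
    by_cases hc : no_cross a p
    · have hne : a ≠ p := ne_of_no_cross hc
      rw [innerF, if_pos hc, if_pos hc]
      congr 1
      rw [PySem.Dict.getD_modify, if_neg hne, PySem.Dict.getD_modify, if_pos rfl]
    · rw [innerF, if_neg hc, if_neg hc]

lemma set_add_add (s : PySem.Set (Int × Int)) (a : Int × Int) :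
    PySem.Set.add (PySem.Set.add s a) a = PySem.Set.add s a :=
  PySem.Set.add_of_mem ((PySem.Set.mem_add s a a).mpr (Or.inr rfl))

lemma inner_getD_other (t : List (Int × Int)) (g : PySem.Dict (Int × Int) (PySem.Set (Int × Int)))
    (a v : Int × Int) (hva : v ≠ a) :
    (t.foldl (innerF a) g).getD v PySem.Set.empty =
      if v ∈ t ∧ no_cross a v = true then
        PySem.Set.add (g.getD v PySem.Set.empty) a
      else g.getD v PySem.Set.empty := by
  induction t generalizing g with
  | nil => simp
  | cons p t ih =>
    rw [List.foldl_cons, ih]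
    by_cases hc : no_cross a p
    · have hne : a ≠ p := ne_of_no_cross hc
      have hg : (innerF a g p).getD v PySem.Set.empty =
          if v = p then PySem.Set.add (g.getD v PySem.Set.empty) a
          else g.getD v PySem.Set.empty := by
        rw [innerF, if_pos hc, PySem.Dict.getD_modify]
        split_ifs with h1
        · rw [h1, PySem.Dict.getD_modify, if_neg (Ne.symm hne)]
        · rw [PySem.Dict.getD_modify, if_neg hva]
      by_cases hvp : v = p
      · subst hvp
        have hcv : no_cross a v = true := hc
        rw [hg, if_pos rfl]
        by_cases hvt : v ∈ t
        · rw [if_pos ⟨hvt, hcv⟩, if_pos ⟨List.mem_cons_self, hcv⟩, set_add_add]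
        · rw [if_neg (by tauto), if_pos ⟨List.mem_cons_self, hcv⟩]
      · rw [hg, if_neg hvp]
        by_cases hvt : v ∈ t ∧ no_cross a v = true
        · rw [if_pos hvt, if_pos ⟨List.mem_cons_of_mem _ hvt.1, hvt.2⟩]
        · rw [if_neg hvt, if_neg (by rw [List.mem_cons]; tauto)]
    · rw [innerF, if_neg hc]
      by_cases hvt : v ∈ t ∧ no_cross a v = true
      · rw [if_pos hvt, if_pos ⟨List.mem_cons_of_mem _ hvt.1, hvt.2⟩]
      · rw [if_neg hvt, if_neg (by
          rw [List.mem_cons]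
          rintro ⟨rfl | h, h2⟩
          · exact hc h2
          · exact hvt ⟨h, h2⟩)]

-- take (i+1) as take i ++ [l[i]]
lemma take_succ_eq (l : List (Int × Int)) (i : Nat) (h : i < l.length) :
    l.take (i + 1) = l.take i ++ [l[i]] := by
  rw [List.take_add_one, List.getElem?_eq_getElem h]; rfl

-- ===== A-side: main invariant =====
lemma mainInv (l : List (Int × Int)) (i : Nat) (hi : i ≤ l.length) :
    ((PySem.List.pyRange 0 (i : Int) 1).foldl (bodyA l) (graph0A l)).keys = PySem.List.dedup l ∧
      ∀ v ∈ PySem.List.dedup l,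
        ((PySem.List.pyRange 0 (i : Int) 1).foldl (bodyA l) (graph0A l)).getD v PySem.Set.empty =
          slotOf l i v := by
  induction i with
  | zero =>
    rw [show ((0 : Nat) : Int) = 0 from rfl, PySem.List.pyRange_one_eq_nil le_rfl]
    refine ⟨graph0_keys l, fun v hv => ?_⟩
    rw [List.foldl_nil, graph0_getD, slotOf]
    simp
  | succ i ih =>
    have hi' : i < l.length := hi
    obtain ⟨hk, hv⟩ := ih (le_of_lt hi')
    have hcast : ((i + 1 : Nat) : Int) = (i : Int) + 1 := by push_cast; ring
    have hrange : PySem.List.pyRange 0 ((i + 1 : Nat) : Int) 1 =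
        PySem.List.pyRange 0 (i : Int) 1 ++ [(i : Int)] := by
      rw [hcast, PySem.List.pyRange_one_succ_right (by positivity)]
    set G := (PySem.List.pyRange 0 (i : Int) 1).foldl (bodyA l) (graph0A l) with hG
    have hfold : (PySem.List.pyRange 0 ((i + 1 : Nat) : Int) 1).foldl (bodyA l) (graph0A l) =
        bodyA l G (i : Int) := by
      rw [hrange, List.foldl_append, List.foldl_cons, List.foldl_nil]
    obtain ⟨a, hadef⟩ : ∃ a, l[i] = a := ⟨_, rfl⟩
    have hget : PySem.List.pyGetD l ((i : Nat) : Int) (0, 0) = a := by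
      rw [PySem.List.pyGetD_natCast, List.getD_eq_getElem _ _ hi', hadef]
    have hbody : bodyA l G (i : Int) = (l.drop (i + 1)).foldl (innerF a) G := by
      rw [bodyA]
      rw [show ((i : Nat) : Int) + 1 = ((i + 1 : Nat) : Int) by push_cast; ring,
        PySem.List.slice_from_natCast]
      simp only [hget]
      rfl
    have hamem : a ∈ PySem.List.dedup l := by
      rw [PySem.List.mem_dedup, ← hadef]; exact List.getElem_mem hi'
    have hpmem : ∀ p ∈ l.drop (i + 1), p ∈ PySem.List.dedup l := fun p hp => by
      rw [PySem.List.mem_dedup]; exact List.mem_of_mem_drop hp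
    have hkeys' : (bodyA l G (i : Int)).keys = PySem.List.dedup l := by
      rw [hbody, inner_keys _ _ _ (hk ▸ hamem) (fun p hp => hk ▸ hpmem p hp), hk]
    rw [hfold]
    refine ⟨hkeys', fun v hvmem => ?_⟩
    have hsplit : l = l.take (i + 1) ++ l.drop (i + 1) := (List.take_append_drop _ l).symm
    have htake1 : l.take (i + 1) = l.take i ++ [a] := hadef ▸ take_succ_eq l i hi'
    have hded1 : PySem.List.dedup (l.take (i + 1)) =
        PySem.Set.add (PySem.List.dedup (l.take i)) a := by
      rw [htake1, dedup_append]; rfl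
    by_cases hva : v = a
    · subst hva
      have htakemem : v ∈ l.take (i + 1) := by rw [htake1]; simp
      have hslot1 : slotOf l (i + 1) v = adjOf l v := by rw [slotOf, if_pos htakemem]
      rw [hbody, inner_getD_self, hv v hvmem, foldl_addIf_eq_update_filter, hslot1]
      by_cases hvi : v ∈ l.take i
      · rw [slotOf, if_pos hvi]
        apply set_update_of_subset
        intro x hx
        obtain ⟨hx1, hx2⟩ := List.mem_filter.mp hx
        exact List.mem_filter.mpr ⟨hpmem x hx1, no_cross_comm x v ▸ hx2⟩
      · rw [slotOf, if_neg hvi]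
        have hadj : adjOf l v = PySem.Set.update
            ((PySem.List.dedup (l.take i)).filter (fun u => no_cross u v))
            ((l.drop (i + 1)).filter (fun u => no_cross u v)) := by
          rw [adjOf]
          conv_lhs => rw [hsplit]
          rw [dedup_append, set_update_filter, hded1, set_filter_add,
            if_neg (by rw [no_cross_self]; exact Bool.false_ne_true)]
        rw [hadj]
        congr 1
        exact List.filter_congr (fun x _ => no_cross_comm v x ▸ rfl)
    · rw [hbody, inner_getD_other _ _ _ _ hva, hv v hvmem]
      by_cases hvi : v ∈ l.take i
      · have hvi1 : v ∈ l.take (i + 1) := by rw [htake1]; exact List.mem_append_left _ hvi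
        rw [slotOf, if_pos hvi, slotOf, if_pos hvi1]
        split_ifs with h
        · exact PySem.Set.add_of_mem
            (List.mem_filter.mpr ⟨hamem, h.2⟩)
        · rfl
      · have hvi1 : v ∉ l.take (i + 1) := by
          rw [htake1]; simp only [List.mem_append, List.mem_singleton]; tauto
        rw [slotOf, if_neg hvi, slotOf, if_neg hvi1, hded1, set_filter_add]
        by_cases hnc : no_cross a v = true
        · rw [if_pos hnc]
          have hvd : v ∈ l.drop (i + 1) := by
            have hvl : v ∈ l := (PySem.List.mem_dedup l v).mp hvmem
            rw [hsplit, htake1] at hvl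
            simp only [List.mem_append, List.mem_singleton] at hvl
            tauto
          rw [if_pos ⟨hvd, hnc⟩]
        · rw [if_neg hnc, if_neg (by tauto)]

-- A's final characterisation.
lemma edge_map_eq_abstract (l : List (Int × Int)) :
    edge_map l = (PySem.List.dedup l).map (fun v => (v.1, v.2, adjOf l v)) := by
  obtain ⟨hk, hv⟩ := mainInv l l.length le_rfl
  rw [edge_map_eq_fold,
    PySem.Dict.items_eq_map_keys _ (hk ▸ PySem.List.nodup_dedup l) PySem.Set.empty,
    hk, List.map_map]
  apply List.map_congr_left
  intro v hvmem
  have hvl : v ∈ l.take l.length := by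
    rw [List.take_length]; exact (PySem.List.mem_dedup l v).mp hvmem
  simp only [Function.comp_apply]
  rw [hv v hvmem, slotOf, if_pos hvl]

-- B's final characterisation.
lemma edge_map_alt_eq_abstract (l : List (Int × Int)) :
    edge_map_alt l = (PySem.List.dedup l).map (fun v => (v.1, v.2, adjOf l v)) := by
  simp only [edge_map_alt]
  apply List.map_congr_left
  intro v hvmem
  simp only [Prod.mk.injEq, true_and]
  rw [foldl_addIf_eq_update_filter]
  have hfc : List.filter (fun u =>
      (!(PySem.Set.contains (PySem.Dict.getD (List.foldl
          (fun (d : PySem.Dict Int (PySem.Set (Int × Int))) (w : Int × Int) =>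
            PySem.Dict.modify (PySem.Dict.modify d w.1 PySem.Set.empty
              (fun s => PySem.Set.add s w)) w.2 PySem.Set.empty
              (fun s => PySem.Set.add s w))
          PySem.Dict.empty (PySem.List.dedup l)) v.1 PySem.Set.empty) u) &&
       !(PySem.Set.contains (PySem.Dict.getD (List.foldl
          (fun (d : PySem.Dict Int (PySem.Set (Int × Int))) (w : Int × Int) =>
            PySem.Dict.modify (PySem.Dict.modify d w.1 PySem.Set.empty
              (fun s => PySem.Set.add s w)) w.2 PySem.Set.empty
              (fun s => PySem.Set.add s w))
          PySem.Dict.empty (PySem.List.dedup l)) v.2 PySem.Set.empty) u)))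
      (PySem.List.dedup l) =
      List.filter (fun u => no_cross u v) (PySem.List.dedup l) := by
    apply List.filter_congr
    intro u humem
    rw [Bool.eq_iff_iff]
    simp only [Bool.and_eq_true, Bool.not_eq_true', PySem.Set.contains_eq_listContains,
      List.contains_eq_mem, decide_eq_false_iff_not, index_mem, PySem.Dict.getD_empty]
    rw [no_cross]
    split_ifs with h <;> simp only [Bool.or_eq_true, beq_iff_eq] at h ⊢ <;>
      constructor <;> intro h2 <;>
        first
          | trivial
          | (exfalso; tauto)
          | (exact ⟨by tauto, by tauto⟩)
  rw [hfc]
  apply set_update_of_disjoint _ _ ((PySem.List.nodup_dedup l).filter _)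
  intro x hx hmem
  exact (List.not_mem_nil (a := x)) hmem

-- ===== VERDICT (by name: the statement is the Claim_ definition above) =====
theorem edge_map_spec : Claim_equal_edge_map := by
  intro assignments _
  unfold Spec_edge_map
  rw [edge_map_eq_abstract, edge_map_alt_eq_abstract]
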